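-- pv_equiv track=rewrite | github.com/AmberWein/TechTroop1 | react/main.py | min_days_to_complete_game
-- ===== SOURCE A (Python) =====
-- def min_days_to_complete_game(tasks, max_diff):
--     if not tasks:
--         return 0
--
--     # מיון המשימות מהקל לקשה
--     sorted_tasks = sorted(tasks)
--     days = 1
--     min_task = sorted_tasks[0]  # המשימה הקלה ביותר ביום הנוכחי
--
--     for difficulty in sorted_tasks[1:]:
--         if difficulty - min_task > max_diff:
--             # מתחילים יום חדש
--             days += 1
--             min_task = difficulty  # המשימה החדשה היא הקלה ביותר ביום החדש
--
--     return days
-- ===== SOURCE B (Python) =====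
-- def _upper_bound(a, x):
--     # first index whose element is > x, in a sorted list (hand-rolled bisect_right)
--     lo, hi = 0, len(a)
--     while lo < hi:
--         mid = (lo + hi) // 2
--         if x < a[mid]:
--             hi = mid
--         else:
--             lo = mid + 1
--     return lo
--
--
-- def min_days_to_complete_game(tasks, max_diff):
--     st = sorted(tasks)
--     n = len(st)
--     days = 0
--     i = 0
--     while i < n:
--         days += 1
--         # one binary search consumes the whole day's group; max() guarantees progress
--         i = max(i + 1, _upper_bound(st, st[i] + max_diff))
--     return days
-- ===== Notes on version B (the rewrite author's own statement) =====
-- stated objective: alternative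
-- what changed: Instead of scanning the sorted list element by element with a running day-anchor, B walks a cursor and consumes each whole day's group at once via a hand-rolled binary search (bisect_right on anchor+max_diff), with max(i+1, ...) guaranteeing progress when max_diff is negative; one loop iteration per day instead of per task.
import Mathlib
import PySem

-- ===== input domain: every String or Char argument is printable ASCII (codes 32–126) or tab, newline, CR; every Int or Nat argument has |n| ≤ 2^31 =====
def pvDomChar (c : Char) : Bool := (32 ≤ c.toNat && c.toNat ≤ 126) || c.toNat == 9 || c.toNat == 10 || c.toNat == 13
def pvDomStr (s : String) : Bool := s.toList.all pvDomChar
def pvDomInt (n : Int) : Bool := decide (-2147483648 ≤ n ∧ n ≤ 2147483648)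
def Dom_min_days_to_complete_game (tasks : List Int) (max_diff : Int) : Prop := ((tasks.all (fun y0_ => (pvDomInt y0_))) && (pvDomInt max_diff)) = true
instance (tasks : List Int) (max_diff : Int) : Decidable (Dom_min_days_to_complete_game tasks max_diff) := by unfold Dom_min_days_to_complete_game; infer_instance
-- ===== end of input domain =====

-- B replaces A's element-by-element scan of the sorted list by a per-day loop that
-- consumes each whole day's group at once with a hand-rolled binary search (alternative
-- decomposition; same sort cost dominates).

-- ===== PORT A =====
-- the for-loop of A: accumulators days, min_task over the remaining sorted tasks
def pvLoopA (max_diff days min_task : Int) : List Int → Int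
  | [] => days
  | difficulty :: rest =>
      if difficulty - min_task > max_diff then pvLoopA max_diff (days + 1) difficulty rest
      else pvLoopA max_diff days min_task rest

def min_days_to_complete_game (tasks : List Int) (max_diff : Int) : Int :=
  if tasks = [] then 0
  else
    match PySem.List.sorted tasks (fun x => x) false with
    | [] => 0  -- unreachable: sorted of a nonempty list is nonempty
    | min_task :: rest => pvLoopA max_diff 1 min_task rest

-- ===== PORT B =====
-- hand-rolled bisect_right of Source B: first index whose element is > x (in-range getD is exact)
def pvUpperBound (a : List Int) (x : Int) (lo hi : Nat) : Nat :=
  if lo < hi then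
    let mid := (lo + hi) / 2
    if x < a.getD mid 0 then pvUpperBound a x lo mid
    else pvUpperBound a x (mid + 1) hi
  else lo
termination_by hi - lo
decreasing_by all_goals omega

-- the while-loop of Source B: cursor i, one iteration per day
def pvLoopB (st : List Int) (max_diff : Int) (n i : Nat) (days : Int) : Int :=
  if i < n then
    pvLoopB st max_diff n (max (i + 1) (pvUpperBound st (st.getD i 0 + max_diff) 0 n)) (days + 1)
  else days
termination_by n - i
decreasing_by omega

def min_days_to_complete_game_alt (tasks : List Int) (max_diff : Int) : Int :=
  let st := PySem.List.sorted tasks (fun x => x) false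
  pvLoopB st max_diff st.length 0 0

-- ===== PRECONDITION & SPEC =====
def Spec_min_days_to_complete_game (tasks : List Int) (max_diff : Int) (out : Int) : Prop := out = min_days_to_complete_game_alt tasks max_diff
instance (tasks : List Int) (max_diff : Int) (out : Int) : Decidable (Spec_min_days_to_complete_game tasks max_diff out) := by unfold Spec_min_days_to_complete_game; infer_instance

-- ===== CLAIM (what is proved, stated in full; the proofs are below) =====
def Claim_equal_min_days_to_complete_game : Prop := ∀ (tasks : List Int) (max_diff : Int), Dom_min_days_to_complete_game tasks max_diff → Spec_min_days_to_complete_game tasks max_diff (min_days_to_complete_game tasks max_diff)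

-- ===== LEMMAS AND PROOFS =====

-- a sorted list is monotone in getD at in-range indices
lemma pv_mono_of_pairwise (st : List Int) (hs : st.Pairwise (· ≤ ·)) :
    ∀ j k, j ≤ k → k < st.length → st.getD j 0 ≤ st.getD k 0 := by
  intro j k hjk hk
  rcases Nat.lt_or_ge j k with h | h
  · have hj : j < st.length := lt_trans h hk
    rw [List.getD_eq_getElem _ _ hj, List.getD_eq_getElem _ _ hk]
    exact List.pairwise_iff_getElem.mp hs j k hj hk h
  · have : j = k := le_antisymm hjk h
    subst this; exact le_refl _

-- correctness of the hand-rolled binary search on a sorted list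
lemma pv_ub_spec (st : List Int) (x : Int)
    (hmono : ∀ j k, j ≤ k → k < st.length → st.getD j 0 ≤ st.getD k 0) :
    ∀ fuel lo hi, hi - lo ≤ fuel → hi ≤ st.length → lo ≤ hi →
      (∀ j, j < lo → st.getD j 0 ≤ x) →
      (∀ j, hi ≤ j → j < st.length → x < st.getD j 0) →
      lo ≤ pvUpperBound st x lo hi ∧ pvUpperBound st x lo hi ≤ hi ∧
      (∀ j, j < pvUpperBound st x lo hi → st.getD j 0 ≤ x) ∧
      (∀ j, pvUpperBound st x lo hi ≤ j → j < st.length → x < st.getD j 0) := by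
  intro fuel
  induction fuel with
  | zero =>
      intro lo hi hf hhi hlh hlow hhigh
      have : hi = lo := by omega
      subst this
      rw [pvUpperBound]
      simp only [lt_irrefl, if_false]
      exact ⟨le_refl _, le_refl _, hlow, hhigh⟩
  | succ k ih =>
      intro lo hi hf hhi hlh hlow hhigh
      rw [pvUpperBound]
      by_cases hlt : lo < hi
      · simp only [hlt, if_true]
        have hmidlt : (lo + hi) / 2 < hi := by omega
        have hmidge : lo ≤ (lo + hi) / 2 := by omega
        have hmidn : (lo + hi) / 2 < st.length := lt_of_lt_of_le hmidlt hhi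
        by_cases hx : x < st.getD ((lo + hi) / 2) 0
        · simp only [hx, if_true]
          have hhigh' : ∀ j, (lo + hi) / 2 ≤ j → j < st.length → x < st.getD j 0 := by
            intro j hj hjn
            exact lt_of_lt_of_le hx (hmono _ _ hj hjn)
          have h := ih lo ((lo + hi) / 2) (by omega) (le_of_lt hmidn) hmidge hlow hhigh'
          exact ⟨h.1, le_trans h.2.1 (le_of_lt hmidlt), h.2.2⟩
        · simp only [hx, if_false]
          rw [not_lt] at hx
          have hlow' : ∀ j, j < (lo + hi) / 2 + 1 → st.getD j 0 ≤ x := by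
            intro j hj
            exact le_trans (hmono _ _ (by omega) hmidn) hx
          have h := ih ((lo + hi) / 2 + 1) hi (by omega) hhi (by omega) hlow' hhigh
          exact ⟨by omega, h.2.1, h.2.2⟩
      · simp only [hlt, if_false]
        have : hi = lo := by omega
        subst this
        exact ⟨le_refl _, le_refl _, hlow, hhigh⟩

-- A's loop ignores a prefix whose elements all stay within max_diff of min_task
lemma pv_loopA_skip (md d m : Int) :
    ∀ (l1 l2 : List Int), (∀ y ∈ l1, y ≤ m + md) →
      pvLoopA md d m (l1 ++ l2) = pvLoopA md d m l2 := by
  intro l1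
  induction l1 with
  | nil => intro l2 _; rfl
  | cons y t ih =>
      intro l2 hall
      have hy : y ≤ m + md := hall y (List.mem_cons_self)
      have : ¬ (y - m > md) := by omega
      simp only [List.cons_append, pvLoopA, this, if_false]
      exact ih l2 (fun z hz => hall z (List.mem_cons_of_mem _ hz))

-- the core correspondence: B's per-day jump loop equals A's element scan on the sorted list
lemma pv_loopB_eq_loopA (st : List Int) (md : Int)
    (hmono : ∀ j k, j ≤ k → k < st.length → st.getD j 0 ≤ st.getD k 0) :
    ∀ fuel i d, st.length - i ≤ fuel → i < st.length →
      pvLoopB st md st.length i d = pvLoopA md (d + 1) (st.getD i 0) (st.drop (i + 1)) := by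
  intro fuel
  induction fuel with
  | zero => intro i d hf hi; omega
  | succ k ih =>
      intro i d hf hi
      set n := st.length with hn
      set x := st.getD i 0 + md with hx
      set r0 := pvUpperBound st x 0 n with hr0
      obtain ⟨-, hr0n, hle0, hgt0⟩ :=
        pv_ub_spec st x hmono n 0 n (by omega) (le_refl _) (Nat.zero_le _)
          (by intro j hj; omega) (by intro j hj hjn; omega)
      set r := max (i + 1) r0 with hr
      have hir : i + 1 ≤ r := le_max_left _ _
      have hrn : r ≤ n := by omega
      -- the elements strictly between the anchor and the jump target stay in range
      have hskip : ∀ y ∈ (st.drop (i + 1)).take (r - (i + 1)), y ≤ st.getD i 0 + md := by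
        intro y hy
        obtain ⟨kk, hkk, hyk⟩ := List.mem_iff_getElem.mp hy
        have hkk' : kk < r - (i + 1) := by
          have := List.length_take_le (r - (i + 1)) (st.drop (i + 1))
          have h2 : kk < min (r - (i + 1)) (st.drop (i + 1)).length := by
            simpa [List.length_take] using hkk
          omega
        have hkd : kk < (st.drop (i + 1)).length := by
          have h2 : kk < min (r - (i + 1)) (st.drop (i + 1)).length := by
            simpa [List.length_take] using hkk
          omega
        have hidx : i + 1 + kk < n := by
          have h3 := hkd
          simp only [List.length_drop] at h3
          omega
        have hyv : y = st.getD (i + 1 + kk) 0 := by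
          rw [← hyk, List.getElem_take, List.getElem_drop,
              List.getD_eq_getElem _ _ (by omega : i + 1 + kk < st.length)]
        have hlr0 : i + 1 + kk < r0 := by omega
        rw [hyv]
        exact hle0 _ hlr0
      have hsplit : st.drop (i + 1) =
          (st.drop (i + 1)).take (r - (i + 1)) ++ st.drop r := by
        have h1 : (st.drop (i + 1)).drop (r - (i + 1)) = st.drop r := by
          rw [List.drop_drop]
          congr 1
          omega
        conv_lhs => rw [← List.take_append_drop (r - (i + 1)) (st.drop (i + 1))]
        rw [h1]
      have hA : pvLoopA md (d + 1) (st.getD i 0) (st.drop (i + 1)) =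
          pvLoopA md (d + 1) (st.getD i 0) (st.drop r) := by
        rw [hsplit, pv_loopA_skip md (d + 1) (st.getD i 0) _ _ hskip]
      rw [pvLoopB, if_pos hi, hA]
      by_cases hrlt : r < n
      · have hgtr : x < st.getD r 0 := hgt0 r (by omega) hrlt
        have hdrop : st.drop r = st.getD r 0 :: st.drop (r + 1) := by
          rw [List.drop_eq_getElem_cons hrlt, List.getD_eq_getElem _ _ hrlt]
        rw [hdrop]
        have hcond : st.getD r 0 - st.getD i 0 > md := by omega
        rw [show pvLoopA md (d + 1) (st.getD i 0) (st.getD r 0 :: st.drop (r + 1)) =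
              pvLoopA md (d + 1 + 1) (st.getD r 0) (st.drop (r + 1)) by
            simp only [pvLoopA, hcond, if_pos]]
        exact ih r (d + 1) (by omega) hrlt
      · have hreq : r = n := by omega
        have hdropnil : st.drop r = [] := by
          rw [hreq, hn]; exact List.drop_length
        rw [hdropnil]
        rw [pvLoopB, if_neg (by omega : ¬ r < n)]
        rfl

-- ===== VERDICT (by name: the statement is the Claim_ definition above) =====
theorem min_days_to_complete_game_spec : Claim_equal_min_days_to_complete_game := by
  intro tasks max_diff _
  unfold Spec_min_days_to_complete_game min_days_to_complete_game min_days_to_complete_game_alt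
  by_cases h : tasks = []
  · subst h
    simp [pvLoopB]
  · rw [if_neg h]
    have hne : PySem.List.sorted tasks (fun x => x) false ≠ [] := by
      rw [Ne, PySem.List.sorted_eq_nil_iff]; exact h
    obtain ⟨m, rest, hst⟩ := List.exists_cons_of_ne_nil hne
    have hs : (PySem.List.sorted tasks (fun x => x) false).Pairwise (· ≤ ·) :=
      PySem.List.sorted_pairwise tasks (fun x => x)
    have hmono := pv_mono_of_pairwise _ hs
    have hlen : 0 < (PySem.List.sorted tasks (fun x => x) false).length := by
      rw [hst]; simp
    have := pv_loopB_eq_loopA (PySem.List.sorted tasks (fun x => x) false) max_diff hmono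
      (PySem.List.sorted tasks (fun x => x) false).length 0 0 (by omega) hlen
    rw [this]
    rw [hst]
    norm_num
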